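-- pv_equiv track=rewrite | github.com/lizhizhong1992/GetOrganelle | Utilities/check_annotations.py | parse_geneious_fasta
-- ===== SOURCE A (Python) =====
-- def parse_geneious_fasta(fasta_matrix):
--     seq_dict = {}
--     for i in range(len(fasta_matrix[0])):
--         this_annotation = fasta_matrix[0][i].split('_-_')[-1]
--         if this_annotation in seq_dict:
--             if fasta_matrix[1][i] not in seq_dict[this_annotation]:
--                 seq_dict[this_annotation].append(fasta_matrix[1][i])
--         else:
--             seq_dict[this_annotation] = [fasta_matrix[1][i]]
--     return seq_dict, list(seq_dict)
-- ===== SOURCE B (Python) =====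
-- def parse_geneious_fasta(fasta_matrix):
--     # Annotation suffix of every name, and the sequence column (indexing keeps
--     # A's IndexError on a short second row).
--     anns = [name.split('_-_')[-1] for name in fasta_matrix[0]]
--     seqs = [fasta_matrix[1][i] for i in range(len(anns))]
--     # Distinct annotations in first-appearance order.
--     keys = list(dict.fromkeys(anns))
--     pairs = list(zip(anns, seqs))
--     # Per key: its sequences in order, duplicates dropped.
--     seq_dict = {k: list(dict.fromkeys(s for a, s in pairs if a == k)) for k in keys}
--     return seq_dict, keys
-- ===== Notes on version B (the rewrite author's own statement) =====
-- stated objective: alternative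
-- what changed: B abandons A's incremental dict-building loop entirely: it precomputes the annotation and sequence columns, takes the ordered-distinct annotation list with dict.fromkeys, and builds each group by filtering the (annotation, sequence) pairs per key and deduplicating, instead of A's single fold with a membership scan inside.
import Mathlib
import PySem

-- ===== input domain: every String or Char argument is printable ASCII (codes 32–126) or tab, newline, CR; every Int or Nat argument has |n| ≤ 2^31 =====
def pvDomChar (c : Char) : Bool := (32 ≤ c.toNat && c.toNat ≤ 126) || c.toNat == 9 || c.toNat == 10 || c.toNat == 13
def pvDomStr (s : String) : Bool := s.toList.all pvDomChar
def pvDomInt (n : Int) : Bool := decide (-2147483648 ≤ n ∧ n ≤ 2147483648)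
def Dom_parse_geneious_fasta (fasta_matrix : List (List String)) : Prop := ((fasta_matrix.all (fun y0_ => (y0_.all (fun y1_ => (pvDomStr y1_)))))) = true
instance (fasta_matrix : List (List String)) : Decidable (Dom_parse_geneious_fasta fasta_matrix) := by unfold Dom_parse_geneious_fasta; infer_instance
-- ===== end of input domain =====

-- B replaces A's incremental dict-building loop by a staged group-by: the ordered distinct
-- annotation list first, then one filter-and-dedup pass per key over the (ann, seq) pairs.

-- ===== PORT A =====
-- fasta_matrix[0][i].split('_-_')[-1]
def pvAnn (s : String) : String :=
  PySem.List.pyGetD ((PySem.Str.split? s "_-_").getD []) (-1) ""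

def parse_geneious_fasta (fasta_matrix : List (List String)) : (List (String × List String)) × List String :=
  let row0 := fasta_matrix.getD 0 []
  let row1 := fasta_matrix.getD 1 []
  let seq_dict : PySem.Dict String (List String) :=
    (List.range row0.length).foldl (fun d i =>
      let ann := pvAnn (row0.getD i "")
      match d.get? ann with
      | some v => if row1.getD i "" ∈ v then d else d.insert ann (v ++ [row1.getD i ""])
      | none => d.insert ann [row1.getD i ""]) PySem.Dict.empty
  (seq_dict.items, seq_dict.keys)

-- ===== PORT B =====
def parse_geneious_fasta_alt (fasta_matrix : List (List String)) : (List (String × List String)) × List String :=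
  let anns := (fasta_matrix.getD 0 []).map pvAnn
  let seqs := (List.range anns.length).map (fun i => (fasta_matrix.getD 1 []).getD i "")
  let keys := PySem.List.dedup anns
  let pairs := anns.zip seqs
  let seq_dict := keys.map (fun k =>
    (k, PySem.List.dedup ((pairs.filter (fun p => p.1 == k)).map (fun p => p.2))))
  (seq_dict, keys)

-- ===== PRECONDITION & SPEC =====
-- Pre_ excludes exactly the inputs where the Python A raises IndexError: an empty
-- fasta_matrix, or a nonempty first row with no second row at least as long as it.
def Pre_parse_geneious_fasta (fasta_matrix : List (List String)) : Prop :=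
  fasta_matrix ≠ [] ∧ (fasta_matrix.getD 0 []).length ≤ ((fasta_matrix.drop 1).headD []).length

instance (fasta_matrix : List (List String)) : Decidable (Pre_parse_geneious_fasta fasta_matrix) := by
  unfold Pre_parse_geneious_fasta; infer_instance

def pvWitness_parse_geneious_fasta : List (List String) :=
  [["g1_-_x", "g2_-_x", "g1_-_x"], ["AAA", "CCC", "AAA"]]

def Spec_parse_geneious_fasta (fasta_matrix : List (List String)) (out : (List (String × List String)) × List String) : Prop := out = parse_geneious_fasta_alt fasta_matrix
instance (fasta_matrix : List (List String)) (out : (List (String × List String)) × List String) : Decidable (Spec_parse_geneious_fasta fasta_matrix out) := by unfold Spec_parse_geneious_fasta; infer_instance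

-- ===== CLAIM (what is proved, stated in full; the proofs are below) =====
def Claim_equal_parse_geneious_fasta : Prop := ∀ (fasta_matrix : List (List String)), Dom_parse_geneious_fasta fasta_matrix → Pre_parse_geneious_fasta fasta_matrix → Spec_parse_geneious_fasta fasta_matrix (parse_geneious_fasta fasta_matrix)

-- ===== LEMMAS AND PROOFS =====

-- A's loop body, over (annotation, sequence) pairs.
def pvStepA (d : PySem.Dict String (List String)) (p : String × String) : PySem.Dict String (List String) :=
  match d.get? p.1 with
  | some v => if p.2 ∈ v then d else d.insert p.1 (v ++ [p.2])
  | none => d.insert p.1 [p.2]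

-- B's group-by, as a function of the pair list.
def pvG (l : List (String × String)) : List (String × List String) :=
  (PySem.Set.ofList (l.map Prod.fst)).map (fun k =>
    (k, PySem.List.dedup ((l.filter (fun p => p.1 == k)).map Prod.snd)))

lemma pvOfList_append_singleton (v : List String) (s : String) :
    PySem.Set.ofList (v ++ [s])
      = if s ∈ v then PySem.Set.ofList v else PySem.Set.ofList v ++ [s] := by
  simp only [PySem.Set.ofList_eq_foldl, List.foldl_append]
  simp [← PySem.Set.ofList_eq_foldl, PySem.Set.add, PySem.Set.contains, PySem.Set.mem_ofList]

lemma pvGet?_mkMap (ks : List String) (g : String → List String) (a : String) :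
    (PySem.Dict.mk (ks.map (fun k => (k, g k)))).get? a
      = if a ∈ ks then some (g a) else none := by
  induction ks with
  | nil => simp [PySem.Dict.get?]
  | cons k t ih =>
      simp only [List.map_cons, PySem.Dict.get?_mk_cons]
      by_cases h : k = a
      · subst h; simp
      · simp [h, Ne.symm h, ih]

lemma pvMain (l : List (String × String)) :
    (l.foldl pvStepA PySem.Dict.empty).items = pvG l := by
  induction l using List.reverseRecOn with
  | nil => simp [pvG, PySem.Set.ofList]; rfl
  | append_singleton l p ih =>
      obtain ⟨a, s⟩ := p
      rw [List.foldl_append, List.foldl_cons, List.foldl_nil]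
      set D := l.foldl pvStepA PySem.Dict.empty with hD
      have hmk : PySem.Dict.mk D.items = D := rfl
      set K := PySem.Set.ofList (l.map Prod.fst) with hK
      set g : String → List String :=
        fun k => PySem.List.dedup ((l.filter (fun p => p.1 == k)).map Prod.snd) with hg
      have hitems : D.items = K.map (fun k => (k, g k)) := ih
      have hget : D.get? a = if a ∈ K then some (g a) else none := by
        rw [← hmk, hitems, pvGet?_mkMap]
      have hfilter : ∀ k, ((l ++ [(a, s)]).filter (fun p => p.1 == k)).map Prod.snd
          = ((l.filter (fun p => p.1 == k)).map Prod.snd) ++ (if a = k then [s] else []) := by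
        intro k
        rw [List.filter_append]
        by_cases h : a = k
        · subst h; simp [List.filter]
        · have hb : (a == k) = false := beq_eq_false_iff_ne.mpr h
          simp [List.filter, hb, h]
      have hKapp : PySem.Set.ofList ((l ++ [(a, s)]).map Prod.fst)
          = if a ∈ l.map Prod.fst then K else K ++ [a] := by
        rw [List.map_append]
        simpa using pvOfList_append_singleton (l.map Prod.fst) a
      have hmemK : a ∈ K ↔ a ∈ l.map Prod.fst := PySem.Set.mem_ofList _ _
      by_cases hmem : a ∈ K
      · -- key already present
        have hKsame : PySem.Set.ofList ((l ++ [(a, s)]).map Prod.fst) = K := by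
          rw [hKapp, if_pos (hmemK.mp hmem)]
        show (pvStepA D (a, s)).items = _
        unfold pvStepA
        rw [hget, if_pos hmem]
        simp only []
        by_cases hs : s ∈ g a
        · rw [if_pos hs]
          rw [hitems]
          unfold pvG
          rw [hKsame]
          apply List.map_congr_left
          intro k hk
          rw [hfilter k]
          by_cases hka : a = k
          · subst hka
            rw [if_pos rfl]
            have hsw : s ∈ (l.filter (fun p => p.1 == a)).map Prod.snd := by
              rw [hg] at hs
              exact (PySem.List.mem_dedup _ _).mp hs
            rw [hg]
            simp only [PySem.List.dedup_eq_ofList]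
            rw [pvOfList_append_singleton, if_pos hsw]
          · rw [if_neg hka, hg]
            simp [PySem.List.dedup_eq_ofList]
        · rw [if_neg hs]
          have hcont : D.contains a = true := by
            rw [PySem.Dict.contains_eq_isSome_get?, hget, if_pos hmem]; rfl
          rw [PySem.Dict.items_insert_of_contains _ _ hcont, hitems, List.map_map]
          unfold pvG
          rw [hKsame]
          apply List.map_congr_left
          intro k hk
          rw [hfilter k]
          by_cases hka : a = k
          · subst hka
            rw [if_pos rfl]
            have hsw : s ∉ (l.filter (fun p => p.1 == a)).map Prod.snd := by
              intro hcontra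
              apply hs
              rw [hg]
              exact (PySem.List.mem_dedup _ _).mpr hcontra
            simp only [Function.comp, beq_self_eq_true, if_true]
            rw [hg]
            simp only [PySem.List.dedup_eq_ofList]
            rw [pvOfList_append_singleton, if_neg hsw]
          · rw [if_neg hka]
            have hb : (k == a) = false := beq_eq_false_iff_ne.mpr (Ne.symm hka)
            simp [Function.comp, hb, hg, PySem.List.dedup_eq_ofList]
      · -- fresh key
        have hnotl : a ∉ l.map Prod.fst := fun h => hmem (hmemK.mpr h)
        have hKnew : PySem.Set.ofList ((l ++ [(a, s)]).map Prod.fst) = K ++ [a] := by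
          rw [hKapp, if_neg hnotl]
        show (pvStepA D (a, s)).items = _
        unfold pvStepA
        rw [hget, if_neg hmem]
        simp only []
        have hcont : D.contains a = false := by
          rw [PySem.Dict.contains_eq_isSome_get?, hget, if_neg hmem]; rfl
        rw [PySem.Dict.items_insert_of_not_contains _ _ hcont, hitems]
        unfold pvG
        rw [hKnew, List.map_append]
        congr 1
        · apply List.map_congr_left
          intro k hk
          rw [hfilter k]
          have hka : a ≠ k := by
            intro h; subst h; exact hmem hk
          rw [if_neg hka, hg]
          simp [PySem.List.dedup_eq_ofList]
        · have hfa : l.filter (fun p => p.1 == a) = [] := by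
            rw [List.filter_eq_nil_iff]
            intro p hp hpa
            apply hnotl
            have hp1 : p.1 = a := by simpa using hpa
            simpa [← hp1] using List.mem_map_of_mem (f := Prod.fst) hp
          simp only [List.map_cons, List.map_nil, hfilter a, hfa]
          simp only [List.nil_append]
          rfl

-- row.map f as A's range-indexed map
lemma pvMapRange (row : List String) (f : String → α) :
    (List.range row.length).map (fun i => f (row.getD i "")) = row.map f := by
  apply List.ext_getElem
  · simp
  · intro i h1 h2
    simp only [List.getElem_map, List.getElem_range]
    congr 1
    exact List.getD_eq_getElem row "" (by simpa using h1)

-- ===== VERDICT (by name: the statement is the Claim_ definition above) =====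
theorem parse_geneious_fasta_spec : Claim_equal_parse_geneious_fasta := by
  intro fm _ _
  unfold Spec_parse_geneious_fasta
  show parse_geneious_fasta fm = parse_geneious_fasta_alt fm
  simp only [parse_geneious_fasta, parse_geneious_fasta_alt]
  set row0 := fm.getD 0 [] with hrow0
  set row1 := fm.getD 1 [] with hrow1
  set l := (List.range row0.length).map
      (fun i => (pvAnn (row0.getD i ""), row1.getD i "")) with hl
  have hfoldA : (List.range row0.length).foldl (fun d i =>
        let ann := pvAnn (row0.getD i "")
        match d.get? ann with
        | some v => if row1.getD i "" ∈ v then d else d.insert ann (v ++ [row1.getD i ""])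
        | none => d.insert ann [row1.getD i ""]) PySem.Dict.empty
      = l.foldl pvStepA PySem.Dict.empty := by
    rw [hl, List.foldl_map]; rfl
  have hpairs : (row0.map pvAnn).zip ((List.range (row0.map pvAnn).length).map
      (fun i => row1.getD i "")) = l := by
    rw [List.length_map, ← pvMapRange row0 pvAnn, List.zip_map']
  have hanns : l.map Prod.fst = row0.map pvAnn := by
    rw [hl, List.map_map]
    exact pvMapRange row0 pvAnn
  have hitems := pvMain l
  rw [hfoldA, hpairs, hitems]
  unfold pvG
  rw [PySem.List.dedup_eq_ofList, hanns]
  refine Prod.ext rfl ?_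
  show PySem.Dict.keys _ = _
  simp only [PySem.Dict.keys, hitems]
  unfold pvG
  rw [List.map_map, hanns]
  have hid : ((fun x : String × List String => x.1) ∘ fun k : String =>
      (k, PySem.List.dedup ((l.filter (fun p => p.1 == k)).map Prod.snd))) = id := rfl
  rw [hid, List.map_id]
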